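-- pv_equiv track=rewrite | github.com/Sayemum/CS412_F24 | Labs/Lab7/cs412_palindrome_dynamic.py | palincount
-- ===== SOURCE A (Python) =====
-- def is_palindrome(s):
--     return s == s[::-1]
--
-- def palincount(s):
--     cache = [0] * (len(s) + 1)
--     cache[len(s)] = 1
--
--     for i in range(len(s)-1, -1 ,-1):
--         total = 0
--         for j in range(i + 1, len(s) + 1):
--             if is_palindrome(s[i:j]):
--                 total += cache[j]
--         cache[i] = total
--
--     return cache[0]
-- ===== SOURCE B (Python) =====
-- def palincount(s):
--     # O(n^2): walk i from the right; `row` holds, for the current start i, which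
--     # substrings s[i:j] are palindromes (row[j-i]), extended from the row for i+1;
--     # the same partition-count DP then reads the flags instead of slicing.
--     n = len(s)
--     cache = [0] * (n + 1)
--     cache[n] = 1
--     row = [True]
--     for i in range(n - 1, -1, -1):
--         c = s[i]
--         row = [True, True] + [c == b and p for b, p in zip(s[i+1:], row)]
--         cache[i] = sum(cj for p, cj in zip(row[1:], cache[i+1:]) if p)
--     return cache[0]
-- ===== Notes on version B (the rewrite author's own statement) =====
-- stated objective: faster
-- what changed: Replaces A's per-substring slice-and-reverse palindrome test inside the partition DP (O(n^3)) by an O(n^2) rolling row of palindrome flags, extended suffix by suffix from the previous row and read in O(1) by the same backward partition-count DP.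
import Mathlib
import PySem

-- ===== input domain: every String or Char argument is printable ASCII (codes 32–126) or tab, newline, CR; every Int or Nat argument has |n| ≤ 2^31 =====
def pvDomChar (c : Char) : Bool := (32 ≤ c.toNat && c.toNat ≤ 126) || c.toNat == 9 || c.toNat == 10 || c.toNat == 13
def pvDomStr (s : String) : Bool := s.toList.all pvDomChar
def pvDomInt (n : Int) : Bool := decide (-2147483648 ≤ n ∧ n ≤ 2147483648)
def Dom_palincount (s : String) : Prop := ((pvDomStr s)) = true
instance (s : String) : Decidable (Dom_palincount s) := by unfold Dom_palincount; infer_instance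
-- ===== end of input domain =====

-- B replaces A's per-substring slice-and-reverse palindrome test (O(n^3)) by an O(n^2)
-- rolling row of palindrome flags extended suffix by suffix, read by the same
-- partition-count DP; measured faster in a timing run.

-- ===== PORT A =====
-- is_palindrome(s): s == s[::-1]  (slice step -1 never raises)
def is_palindrome (l : List Char) : Bool :=
  l == (PySem.List.slice? l none none (-1)).getD []

def palincount (s : String) : Int :=
  let cs := s.toList
  let n : Int := (cs.length : Int)
  let cache : List Int := PySem.List.pyRepeat [0] (n + 1)
  let cache := PySem.List.pySetD cache n 1                 -- cache[len(s)] = 1 (index in range)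
  let cache := (PySem.List.pyRange (n - 1) (-1) (-1)).foldl (fun cache i =>
    let total := (PySem.List.pyRange (i + 1) (n + 1) 1).foldl (fun total j =>
      if is_palindrome (PySem.List.slice cs (some i) (some j)) then
        total + PySem.List.pyGetD cache j 0                -- cache[j], index in range
      else total) 0
    PySem.List.pySetD cache i total) cache
  PySem.List.pyGetD cache 0 0

-- ===== PORT B =====
def palincount_alt (s : String) : Int :=
  let cs := s.toList
  let n : Int := (cs.length : Int)
  let cache : List Int := PySem.List.pyRepeat [0] (n + 1)
  let cache := PySem.List.pySetD cache n 1                 -- cache[n] = 1 (index in range)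
  let st := (PySem.List.pyRange (n - 1) (-1) (-1)).foldl (fun (st : List Int × List Bool) i =>
      let cache := st.1
      let row := st.2
      let c := PySem.List.pyGetD cs i ' '                  -- c = s[i], index always in range here
      let row := [true, true] ++ (List.zip (PySem.List.slice cs (some (i + 1)) none) row).map
          (fun bp => (c == bp.1) && bp.2)
      let total := (List.zip (PySem.List.slice row (some 1) none)
          (PySem.List.slice cache (some (i + 1)) none)).foldl
          (fun acc pc => if pc.1 then acc + pc.2 else acc) 0   -- sum(... if p)
      (PySem.List.pySetD cache i total, row)) (cache, [true])
  PySem.List.pyGetD st.1 0 0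

-- ===== PRECONDITION & SPEC =====
def Spec_palincount (s : String) (out : Int) : Prop := out = palincount_alt s
instance (s : String) (out : Int) : Decidable (Spec_palincount s out) := by unfold Spec_palincount; infer_instance

-- ===== CLAIM (what is proved, stated in full; the proofs are below) =====
def Claim_equal_palincount : Prop := ∀ (s : String), Dom_palincount s → Spec_palincount s (palincount s)

-- ===== LEMMAS AND PROOFS =====

lemma isPal_eq (l : List Char) : is_palindrome l = (l == l.reverse) := by
  simp [is_palindrome, PySem.List.slice?_none_none_neg_one]

lemma isPal_cons_concat (x y : Char) (m : List Char) :
    is_palindrome (x :: (m ++ [y])) = ((x == y) && is_palindrome m) := by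
  rw [isPal_eq, isPal_eq]
  have hrev : (x :: (m ++ [y])).reverse = y :: (m.reverse ++ [x]) := by simp
  rw [hrev]
  rw [Bool.eq_iff_iff]
  simp only [beq_iff_eq, Bool.and_eq_true, List.cons.injEq]
  constructor
  · rintro ⟨rfl, h2⟩
    have := List.append_inj' h2 (by simp)
    exact ⟨rfl, this.1⟩
  · rintro ⟨rfl, h2⟩
    refine ⟨rfl, ?_⟩; conv_lhs => rw [h2]

def pvSliceN (cs : List Char) (a b : Nat) : List Char := (cs.drop a).take (b - a)
def pvPalS (cs : List Char) (a b : Nat) : Bool := is_palindrome (pvSliceN cs a b)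

lemma pv_slice_decomp (cs : List Char) (a b : Nat) (h2 : a + 2 ≤ b) (hb : b ≤ cs.length) :
    pvSliceN cs a b =
      cs[a]'(by omega) :: (pvSliceN cs (a + 1) (b - 1) ++ [cs[b - 1]'(by omega)]) := by
  unfold pvSliceN
  have ha : a < cs.length := by omega
  rw [List.drop_eq_getElem_cons ha]
  have e1 : b - a = (b - a - 1) + 1 := by omega
  rw [e1, List.take_succ_cons]
  congr 1
  have e2 : b - a - 1 = (b - a - 2) + 1 := by omega
  rw [e2, List.take_add_one]
  congr 1
  · congr 1; omega
  · rw [List.getElem?_drop]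
    have : a + 1 + (b - a - 2) = b - 1 := by omega
    rw [this, List.getElem?_eq_getElem (by omega)]
    simp

lemma pvPalS_diag (cs : List Char) (a : Nat) : pvPalS cs a a = true := by
  simp [pvPalS, pvSliceN, is_palindrome, PySem.List.slice?_none_none_neg_one]

lemma pvPalS_single (cs : List Char) (a : Nat) (h : a + 1 ≤ cs.length) :
    pvPalS cs a (a + 1) = true := by
  unfold pvPalS pvSliceN
  have : cs.drop a = cs[a]'(by omega) :: cs.drop (a+1) := List.drop_eq_getElem_cons (by omega)
  rw [this]
  have e1 : a + 1 - a = 1 := by omega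
  rw [e1, List.take_succ_cons, List.take_zero]
  simp [is_palindrome, PySem.List.slice?_none_none_neg_one]

lemma pvPalS_rec (cs : List Char) (a b : Nat) (h2 : a + 2 ≤ b) (hb : b ≤ cs.length) :
    pvPalS cs a b =
      ((cs[a]'(by omega) == cs[b - 1]'(by omega)) && pvPalS cs (a + 1) (b - 1)) := by
  unfold pvPalS
  rw [pv_slice_decomp cs a b h2 hb, isPal_cons_concat]

-- the palindrome row of B at start index i: row[k] = "s[i : i+k] is a palindrome"
def pvRow (cs : List Char) (i : Nat) : List Bool :=
  (List.range (cs.length - i + 1)).map (fun k => pvPalS cs i (i + k))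

lemma pvRow_last (cs : List Char) : pvRow cs cs.length = [true] := by
  simp [pvRow, List.range_succ, pvPalS_diag]

lemma pvRow_step (cs : List Char) (i : Nat) (hi : i < cs.length) :
    ([true, true] ++ (List.zip (cs.drop (i + 1)) (pvRow cs (i + 1))).map
        (fun bp => (cs[i]'hi == bp.1) && bp.2)) = pvRow cs i := by
  have hlenz : ((List.zip (cs.drop (i + 1)) (pvRow cs (i + 1))).map
      (fun bp => (cs[i]'hi == bp.1) && bp.2)).length = cs.length - i - 1 := by
    rw [List.length_map, List.length_zip, List.length_drop]
    simp only [pvRow, List.length_map, List.length_range]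
    omega
  apply List.ext_getElem
  · rw [List.length_append, hlenz]
    simp only [pvRow, List.length_map, List.length_range, List.length_cons, List.length_nil]
    omega
  · intro k hk1 hk2
    match k with
    | 0 =>
      simp only [pvRow, List.getElem_map, List.getElem_range]
      rw [List.getElem_append_left (by simp)]
      simp [pvPalS_diag]
    | 1 =>
      simp only [pvRow, List.getElem_map, List.getElem_range]
      rw [List.getElem_append_left (by simp)]
      simp [pvPalS_single cs i (by omega)]
    | (k + 2) =>
      have hk : k < cs.length - i - 1 := by
        simp only [List.length_append, List.length_cons, List.length_nil, hlenz] at hk1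
        omega
      rw [List.getElem_append_right (by simp)]
      simp only [pvRow, List.getElem_map, List.getElem_range, List.getElem_zip,
        List.getElem_drop, List.length_cons, List.length_nil]
      rw [pvPalS_rec cs i (i + (k + 2)) (by omega) (by omega)]
      have e1 : i + (k + 2) - 1 = i + 1 + k := by omega
      simp [e1]

lemma pvRow_tail (cs : List Char) (i : Nat) :
    (pvRow cs i).tail = (List.range (cs.length - i)).map (fun k => pvPalS cs i (i + 1 + k)) := by
  rw [pvRow, List.range_succ_eq_map, List.map_cons, List.tail_cons, List.map_map]
  apply List.map_congr_left
  intro k _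
  simp only [Function.comp_apply]
  congr 1
  omega

-- the filtered zip-sum of B equals A's range fold over j
lemma pvZ (cs : List Char) (iN : Nat) (t : Nat) : ∀ (s0 : Nat) (cache : List Int) (acc : Int),
    s0 + t = cs.length + 1 →
    cache.length = cs.length + 1 →
    (List.zip ((List.range t).map (fun k => pvPalS cs iN (s0 + k))) (cache.drop s0)).foldl
        (fun acc pc => if pc.1 then acc + pc.2 else acc) acc
      = (PySem.List.pyRange (s0 : Int) ((cs.length : Int) + 1) 1).foldl
        (fun total j => if is_palindrome (PySem.List.slice cs (some (iN : Int)) (some j)) then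
            total + PySem.List.pyGetD cache j 0 else total) acc := by
  induction t with
  | zero =>
    intro s0 cache acc hs hlen
    rw [PySem.List.pyRange_one_eq_nil (by omega)]
    simp
  | succ t ih =>
    intro s0 cache acc hs hlen
    rw [List.range_succ_eq_map, List.map_cons]
    have hdrop : cache.drop s0 = cache[s0]'(by omega) :: cache.drop (s0 + 1) :=
      List.drop_eq_getElem_cons (by omega)
    rw [hdrop, List.zip_cons_cons, List.foldl_cons,
      PySem.List.pyRange_one_cons (by omega), List.foldl_cons]
    have hcond : is_palindrome (PySem.List.slice cs (some (iN : Int)) (some (s0 : Int)))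
        = pvPalS cs iN (s0 + 0) := by
      rw [PySem.List.slice_natCast]
      rfl
    have hget : PySem.List.pyGetD cache ((s0 : Nat) : Int) 0 = cache[s0]'(by omega) := by
      rw [PySem.List.pyGetD_natCast]
      exact List.getD_eq_getElem cache 0 (by omega)
    rw [hcond, hget, List.map_map]
    have hmap : ((List.range t).map (fun k => pvPalS cs iN (s0 + Nat.succ k)))
        = (List.range t).map (fun k => pvPalS cs iN ((s0 + 1) + k)) := by
      apply List.map_congr_left
      intro k _
      congr 1
      omega
    have hcast : ((s0 : Int) + 1) = (((s0 + 1 : Nat)) : Int) := by push_cast; ring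
    have hcomp : (fun k => pvPalS cs iN (s0 + k)) ∘ Nat.succ
        = fun k => pvPalS cs iN (s0 + Nat.succ k) := rfl
    rw [hcomp, hmap, hcast]
    by_cases hp : pvPalS cs iN (s0 + 0) = true
    · rw [if_pos hp]
      exact ih (s0 + 1) cache _ (by omega) hlen
    · rw [if_neg hp]
      exact ih (s0 + 1) cache acc (by omega) hlen

-- one backward loop: A's cache fold equals the first component of B's paired fold
lemma pv_loop (cs : List Char) (k : Nat) : ∀ (cacheA : List Int),
    k ≤ cs.length →
    cacheA.length = cs.length + 1 →
    List.foldl (fun cache i =>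
        PySem.List.pySetD cache i
          (List.foldl (fun total j =>
              if is_palindrome (PySem.List.slice cs (some i) (some j)) then
                total + PySem.List.pyGetD cache j 0
              else total) 0
            (PySem.List.pyRange (i + 1) ((cs.length : Int) + 1) 1)))
      cacheA (PySem.List.pyRange ((k : Int) - 1) (-1) (-1))
    = (List.foldl (fun (st : List Int × List Bool) i =>
        (PySem.List.pySetD st.1 i
          ((List.zip (PySem.List.slice ([true, true] ++
                (List.zip (PySem.List.slice cs (some (i + 1)) none) st.2).map
                  (fun bp => (PySem.List.pyGetD cs i ' ' == bp.1) && bp.2)) (some 1) none)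
              (PySem.List.slice st.1 (some (i + 1)) none)).foldl
            (fun acc pc => if pc.1 then acc + pc.2 else acc) 0),
         [true, true] ++ (List.zip (PySem.List.slice cs (some (i + 1)) none) st.2).map
            (fun bp => (PySem.List.pyGetD cs i ' ' == bp.1) && bp.2)))
        (cacheA, pvRow cs k) (PySem.List.pyRange ((k : Int) - 1) (-1) (-1))).1 := by
  induction k with
  | zero =>
    intro cacheA hk hlen
    rw [PySem.List.pyRange_neg_one_eq_nil (by omega)]
    rfl
  | succ k ih =>
    intro cacheA hk hlen
    have hcast : (((k + 1 : Nat)) : Int) - 1 = ((k : Nat) : Int) := by push_cast; ring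
    rw [hcast, PySem.List.pyRange_neg_one_cons (by omega), List.foldl_cons, List.foldl_cons]
    -- the new row is pvRow cs k
    have hrow : [true, true] ++ (List.zip (PySem.List.slice cs (some ((k : Int) + 1)) none)
          (pvRow cs (k + 1))).map
          (fun bp => (PySem.List.pyGetD cs (k : Int) ' ' == bp.1) && bp.2)
        = pvRow cs k := by
      have hc1 : ((k : Int) + 1) = (((k + 1 : Nat)) : Int) := by push_cast; ring
      rw [hc1, PySem.List.slice_from_natCast]
      have hc2 : PySem.List.pyGetD cs ((k : Nat) : Int) ' ' = cs[k]'(by omega) := by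
        rw [PySem.List.pyGetD_natCast]
        exact List.getD_eq_getElem cs ' ' (by omega)
      rw [hc2]
      exact pvRow_step cs k (by omega)
    rw [hrow]
    -- the totals agree
    have htot : (List.zip (PySem.List.slice (pvRow cs k) (some 1) none)
          (PySem.List.slice cacheA (some ((k : Int) + 1)) none)).foldl
          (fun acc pc => if pc.1 then acc + pc.2 else acc) 0
        = List.foldl (fun total j =>
              if is_palindrome (PySem.List.slice cs (some ((k : Nat) : Int)) (some j)) then
                total + PySem.List.pyGetD cacheA j 0
              else total) 0
            (PySem.List.pyRange ((k : Int) + 1) ((cs.length : Int) + 1) 1) := by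
      have hc1 : ((k : Int) + 1) = (((k + 1 : Nat)) : Int) := by push_cast; ring
      rw [PySem.List.slice_from_one, hc1, PySem.List.slice_from_natCast, pvRow_tail]
      have hmap : (List.range (cs.length - k)).map (fun t => pvPalS cs k (k + 1 + t))
          = (List.range (cs.length - k)).map (fun t => pvPalS cs k ((k + 1) + t)) := rfl
      rw [hmap]
      exact pvZ cs k (cs.length - k) (k + 1) cacheA 0 (by omega) hlen
    rw [htot]
    exact ih (PySem.List.pySetD cacheA ((k : Nat) : Int)
        (List.foldl (fun total j =>
            if is_palindrome (PySem.List.slice cs (some ((k : Nat) : Int)) (some j)) then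
              total + PySem.List.pyGetD cacheA j 0
            else total) 0
          (PySem.List.pyRange ((k : Int) + 1) ((cs.length : Int) + 1) 1)))
      (by omega) (by rw [PySem.List.length_pySetD]; exact hlen)

-- the two port bodies, written out (defeq to the bodies of the two ports)
def pvA (cs : List Char) : Int :=
  PySem.List.pyGetD
    (List.foldl (fun cache i =>
        PySem.List.pySetD cache i
          (List.foldl (fun total j =>
              if is_palindrome (PySem.List.slice cs (some i) (some j)) then
                total + PySem.List.pyGetD cache j 0
              else total) 0
            (PySem.List.pyRange (i + 1) ((cs.length : Int) + 1) 1)))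
      (PySem.List.pySetD (PySem.List.pyRepeat [0] ((cs.length : Int) + 1)) (cs.length : Int) 1)
      (PySem.List.pyRange ((cs.length : Int) - 1) (-1) (-1)))
    0 0

def pvB (cs : List Char) : Int :=
  PySem.List.pyGetD
    (List.foldl (fun (st : List Int × List Bool) i =>
        (PySem.List.pySetD st.1 i
          ((List.zip (PySem.List.slice ([true, true] ++
                (List.zip (PySem.List.slice cs (some (i + 1)) none) st.2).map
                  (fun bp => (PySem.List.pyGetD cs i ' ' == bp.1) && bp.2)) (some 1) none)
              (PySem.List.slice st.1 (some (i + 1)) none)).foldl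
            (fun acc pc => if pc.1 then acc + pc.2 else acc) 0),
         [true, true] ++ (List.zip (PySem.List.slice cs (some (i + 1)) none) st.2).map
            (fun bp => (PySem.List.pyGetD cs i ' ' == bp.1) && bp.2)))
      ((PySem.List.pySetD (PySem.List.pyRepeat [0] ((cs.length : Int) + 1)) (cs.length : Int) 1),
        [true])
      (PySem.List.pyRange ((cs.length : Int) - 1) (-1) (-1))).1
    0 0

lemma pv_main (cs : List Char) : pvA cs = pvB cs := by
  have hlen : (PySem.List.pySetD (PySem.List.pyRepeat [(0 : Int)] ((cs.length : Int) + 1))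
      (cs.length : Int) 1).length = cs.length + 1 := by
    rw [PySem.List.length_pySetD, PySem.List.pyRepeat_singleton, List.length_replicate]
    have : ((cs.length : Int) + 1) = (((cs.length + 1 : Nat)) : Int) := by push_cast; ring
    rw [this, Int.toNat_natCast]
  unfold pvA pvB
  congr 1
  have h := pv_loop cs cs.length _ (le_refl _) hlen
  rw [pvRow_last] at h
  exact h

-- ===== VERDICT (by name: the statement is the Claim_ definition above) =====
theorem palincount_spec : Claim_equal_palincount := by
  intro s _
  show palincount s = palincount_alt s
  have h1 : palincount s = pvA s.toList := rfl
  have h2 : palincount_alt s = pvB s.toList := rfl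
  rw [h1, h2]
  exact pv_main s.toList
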